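-- pv_equiv track=rewrite | github.com/Shilenkovv/Algorithms_PyGen_bg | 2_functions/2_3_3.py | get_quadrant
-- ===== SOURCE A (Python) =====
-- def get_quadrant(p: tuple[int, int]) -> int | None:
--     """
--     Определяет номер координатной четверти для заданной точки на плоскости.
--
--     Точка задается в виде кортежа из двух целых чисел (x, y).
--     Если точка лежит на одной из осей, возвращается None.
--
--     Args:
--         p (tuple[int, int]): Кортеж из двух целых чисел (x, y), где -10 <= x, y <= 10.
--
--     Returns:
--         int | None: Номер четверти (1, 2, 3 или 4) или None, если точка лежит на оси/осях.
--     """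
--     if not isinstance(p, tuple) or len(p) != 2 or not all(isinstance(i, int) for i in p):
--         raise ValueError('p должно быть кортежем из двух целых чисел')
--
--     if any(num == 0 for num in p):
--         return None
--     if p[0] > 0 and p[1] > 0:
--         return 1
--     if p[0] < 0 and p[1] > 0:
--         return 2
--     if p[0] < 0 and p[1] < 0:
--         return 3
--     if p[0] > 0 and p[1] < 0:
--         return 4
-- ===== SOURCE B (Python) =====
-- def get_quadrant(p: tuple[int, int]) -> int | None:
--     if not isinstance(p, tuple) or len(p) != 2 or not all(isinstance(i, int) for i in p):
--         raise ValueError('p должно быть кортежем из двух целых чисел')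
--     x, y = p
--     if x * y == 0:
--         return None
--     sx = 1 if x > 0 else -1
--     sy = 1 if y > 0 else -1
--     return (5 - 2 * sy - sx * sy) // 2
-- ===== Notes on version B (the rewrite author's own statement) =====
-- stated objective: alternative
-- what changed: Replaces the four-way comparison cascade by a branch-free arithmetic closed form: axis test via product x*y == 0, then quadrant computed as (5 - 2*sy - sx*sy)//2 from the unit signs sx, sy.
import Mathlib
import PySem

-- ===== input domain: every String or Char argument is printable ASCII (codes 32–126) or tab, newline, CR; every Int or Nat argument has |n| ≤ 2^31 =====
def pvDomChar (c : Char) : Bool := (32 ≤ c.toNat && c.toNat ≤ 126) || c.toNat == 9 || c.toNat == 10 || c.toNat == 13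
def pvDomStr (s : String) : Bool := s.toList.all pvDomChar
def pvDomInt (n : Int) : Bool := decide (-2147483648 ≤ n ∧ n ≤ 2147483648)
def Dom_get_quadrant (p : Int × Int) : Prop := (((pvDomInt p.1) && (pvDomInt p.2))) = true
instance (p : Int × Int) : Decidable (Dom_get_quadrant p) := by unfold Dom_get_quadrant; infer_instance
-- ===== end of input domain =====

-- B replaces A's four-way comparison cascade by a branch-free arithmetic closed form on the unit signs (objective: alternative).


-- ===== PORT A =====
-- A: the isinstance/len guard always passes under the type convention; then None on an axis,
-- else the four-way sign cascade (falling off the end → implicit None, unreachable).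
def get_quadrant (p : Int × Int) : Option Int :=
  if p.1 = 0 ∨ p.2 = 0 then none
  else if p.1 > 0 ∧ p.2 > 0 then some 1
  else if p.1 < 0 ∧ p.2 > 0 then some 2
  else if p.1 < 0 ∧ p.2 < 0 then some 3
  else if p.1 > 0 ∧ p.2 < 0 then some 4
  else none

-- ===== PORT B =====
-- B: axis test via the product, then a closed arithmetic formula on the unit signs.
def get_quadrant_alt (p : Int × Int) : Option Int :=
  if p.1 * p.2 = 0 then none
  else
    let sx : Int := if p.1 > 0 then 1 else -1
    let sy : Int := if p.2 > 0 then 1 else -1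
    some (PySem.Int.floordiv (5 - 2 * sy - sx * sy) 2)

-- ===== PRECONDITION & SPEC =====
def Spec_get_quadrant (p : Int × Int) (out : Option Int) : Prop := out = get_quadrant_alt p
instance (p : Int × Int) (out : Option Int) : Decidable (Spec_get_quadrant p out) := by unfold Spec_get_quadrant; infer_instance

-- ===== CLAIM =====
def Claim_equal_get_quadrant : Prop := ∀ (p : Int × Int), Dom_get_quadrant p → Spec_get_quadrant p (get_quadrant p)

-- ===== LEMMAS AND PROOFS =====

-- ===== VERDICT =====
theorem get_quadrant_spec : Claim_equal_get_quadrant := by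
  intro p _
  obtain ⟨x, y⟩ := p
  unfold Spec_get_quadrant get_quadrant get_quadrant_alt
  simp only [mul_eq_zero]
  split_ifs <;> first | rfl | omega | decide | (exfalso; omega)
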